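-- pv_equiv track=rewrite | github.com/awesomedude123-ai/ProgrammingWork | Python/tutorial/venv/Practice/FileReadingClasses/Occurrences.py | words_and_punctuation
-- ===== SOURCE A (Python) =====
-- import string
--
-- def words_and_punctuation(word):
--     value=[];x=""
--     for i in word:
--         if i in string.punctuation:
--             value.append(x)
--             value.append(i)
--             break
--         else:
--             x+=i
--     if len(value)==0:
--         value.append(x)
--     return value
-- ===== SOURCE B (Python) =====
-- import string
--
-- def words_and_punctuation(word):
--     hits = [i for i in (word.find(p) for p in string.punctuation) if i >= 0]
--     if not hits:
--         return [word]
--     i = min(hits)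
--     return [word[:i], word[i]]
-- ===== Notes on version B (the rewrite author's own statement) =====
-- stated objective: faster
-- what changed: Replaces the early-breaking forward character scan with a prefix accumulator by 32 C-level str.find probes (one per punctuation character) whose nonnegative results are reduced with min to the earliest punctuation index, then slicing word[:i] and word[i].
import Mathlib
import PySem

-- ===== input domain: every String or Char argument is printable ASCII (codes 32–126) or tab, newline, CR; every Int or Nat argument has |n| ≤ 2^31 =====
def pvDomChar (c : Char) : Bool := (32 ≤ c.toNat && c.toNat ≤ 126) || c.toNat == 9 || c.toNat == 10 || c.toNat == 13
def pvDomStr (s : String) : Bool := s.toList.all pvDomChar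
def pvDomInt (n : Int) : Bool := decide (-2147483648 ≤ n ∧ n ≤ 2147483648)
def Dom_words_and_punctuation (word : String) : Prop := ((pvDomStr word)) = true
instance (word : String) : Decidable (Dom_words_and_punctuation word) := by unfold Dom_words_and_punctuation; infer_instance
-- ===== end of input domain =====

-- B replaces A's early-breaking per-character scan-with-accumulator by per-punctuation str.find probes reduced with min, then slicing; a timing run measured B faster.


-- string.punctuation
def pvPunct : List Char := "!\"#$%&'()*+,-./:;<=>?@[\\]^_`{|}~".toList

-- ===== PORT A =====
-- the for-loop with early break: state is the accumulated prefix x (as chars);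
-- reaching the end of the word = 'len(value)==0' path, appending x
def wpGoA : List Char → List Char → List String
  | [], x => [String.ofList x]
  | i :: rest, x =>
    if PySem.Chars.isIn [i] pvPunct then [String.ofList x, String.ofList [i]]
    else wpGoA rest (x ++ [i])

def words_and_punctuation (word : String) : List String :=
  wpGoA word.toList []

-- ===== PORT B =====
def words_and_punctuation_alt (word : String) : List String :=
  let hits := (pvPunct.map (fun p => PySem.Chars.find word.toList [p])).filter
                (fun j => decide (0 ≤ j))
  match PySem.List.min? hits (fun x => x) with
  | none => [word]
  | some i => [String.ofList (PySem.List.slice word.toList none (some i)),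
               String.ofList (PySem.List.pyGet? word.toList i).toList]

-- ===== PRECONDITION & SPEC =====
def Spec_words_and_punctuation (word : String) (out : List String) : Prop := out = words_and_punctuation_alt word
instance (word : String) (out : List String) : Decidable (Spec_words_and_punctuation word out) := by unfold Spec_words_and_punctuation; infer_instance

-- ===== CLAIM (what is proved, stated in full; the proofs are below) =====
def Claim_equal_words_and_punctuation : Prop := ∀ (word : String), Dom_words_and_punctuation word → Spec_words_and_punctuation word (words_and_punctuation word)

-- ===== LEMMAS AND PROOFS =====

theorem singleton_prefix_iff {c : Char} {l : List Char} : [c] <+: l ↔ l.head? = some c := by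
  cases l with
  | nil => simp
  | cons a t =>
    constructor
    · rintro ⟨s, hs⟩; simp at hs; simp [hs.1]
    · intro h; simp at h; exact ⟨t, by simp [h]⟩

theorem singleton_prefix_drop_iff {c : Char} {l : List Char} {i : Nat} :
    [c] <+: l.drop i ↔ l[i]? = some c := by
  rw [singleton_prefix_iff, List.head?_drop]

theorem singleton_infix_iff {c : Char} {l : List Char} : [c] <:+: l ↔ c ∈ l := by
  constructor
  · intro h; exact h.mem (by simp)
  · intro h
    obtain ⟨pre, suf, hl⟩ := List.mem_iff_append.mp h
    exact ⟨pre, suf, by simp [hl]⟩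

-- find of a singleton that occurs first at index k
theorem find_singleton_eq {c : Char} {l : List Char} {k : Nat}
    (hk : l[k]? = some c) (hmin : ∀ j < k, l[j]? ≠ some c) :
    PySem.Chars.find l [c] = (k : Int) := by
  have hinf : [c] <:+: l := singleton_infix_iff.mpr (by
    have := List.getElem?_eq_some_iff.mp hk
    obtain ⟨h1, h2⟩ := this; exact h2 ▸ List.getElem_mem h1)
  have hnn : 0 ≤ PySem.Chars.find l [c] := (PySem.Chars.find_nonneg_iff l [c]).mpr hinf
  obtain ⟨hpre, hfirst⟩ := PySem.Chars.find_spec (s := l) (sub := [c]) hnn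
  set f := PySem.Chars.find l [c] with hf
  have hfk : f.toNat = k := by
    by_contra hne
    rcases Nat.lt_or_ge f.toNat k with h | h
    · exact hmin _ h (singleton_prefix_drop_iff.mp hpre)
    · have hlt : k < f.toNat := lt_of_le_of_ne h (fun e => hne e.symm)
      exact hfirst k hlt (singleton_prefix_drop_iff.mpr hk)
  omega

-- A's loop in terms of findIdx?
theorem wpGoA_eq (l : List Char) (x : List Char) :
    wpGoA l x =
      match l.findIdx? (fun c => decide (c ∈ pvPunct)) with
      | none => [String.ofList (x ++ l)]
      | some k => [String.ofList (x ++ l.take k), String.ofList (PySem.List.pyGet? l (k : Int)).toList] := by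
  induction l generalizing x with
  | nil => simp [wpGoA]
  | cons a t ih =>
    by_cases hp : a ∈ pvPunct
    · have : PySem.Chars.isIn [a] pvPunct = true :=
        (PySem.Chars.isIn_iff_infix [a] pvPunct).mpr (singleton_infix_iff.mpr hp)
      simp [wpGoA, this, List.findIdx?_cons, hp, PySem.List.pyGet?, PySem.List.pyIdx?]
    · have : PySem.Chars.isIn [a] pvPunct = false := by
        rw [PySem.Chars.isIn_eq_false_iff [a] pvPunct]; intro h; exact hp (singleton_infix_iff.mp h)
      rw [wpGoA]
      simp only [this, Bool.false_eq_true, if_false, ih, List.findIdx?_cons, hp,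
        decide_false]
      cases htf : t.findIdx? (fun c => decide (c ∈ pvPunct)) with
      | none => simp
      | some k =>
        simp only [Option.map_some]
        have h1 : (a :: t).take (k + 1) = a :: t.take k := by simp
        have h2 : PySem.List.pyGet? (a :: t) ((k : Nat) + 1 : Int) = PySem.List.pyGet? t (k : Int) := by
          have hk1 : ((k : Nat) + 1 : Int) = ((k + 1 : Nat) : Int) := by push_cast; ring
          rw [hk1, PySem.List.pyGet?_natCast, PySem.List.pyGet?_natCast]
          simp
        rw [h1]
        push_cast at h2 ⊢
        rw [h2]
        simp

-- ===== VERDICT (by name: the statement is the Claim_ definition above) =====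
theorem words_and_punctuation_spec : Claim_equal_words_and_punctuation := by
  intro word _
  unfold Spec_words_and_punctuation words_and_punctuation
  rw [wpGoA_eq]
  cases htf : word.toList.findIdx? (fun c => decide (c ∈ pvPunct)) with
  | none =>
    have hnone : ∀ c ∈ word.toList, c ∉ pvPunct := by
      intro c hc
      have := List.findIdx?_eq_none_iff.mp htf c hc
      simpa using this
    have hempty : (pvPunct.map (fun p => PySem.Chars.find word.toList [p])).filter
        (fun j => decide (0 ≤ j)) = [] := by
      rw [List.filter_eq_nil_iff]
      intro j hj
      obtain ⟨p, hp, rfl⟩ := List.mem_map.mp hj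
      have : PySem.Chars.find word.toList [p] = -1 := by
        rw [PySem.Chars.find_eq_neg_one_iff]
        intro h
        exact hnone p (singleton_infix_iff.mp h) hp
      simp [this]
    simp [words_and_punctuation_alt, hempty, PySem.List.min?, String.ofList_toList]
  | some k =>
    obtain ⟨hk, hpk, hmin⟩ := List.findIdx?_eq_some_iff_getElem.mp htf
    set l := word.toList with hl
    set c := l[k] with hc
    have hcp : c ∈ pvPunct := by simpa using hpk
    have hminP : ∀ j (hj : j < k), l[j]'(by omega) ∉ pvPunct := by
      intro j hj
      have := hmin j hj
      simpa using this
    set hits := (pvPunct.map (fun p => PySem.Chars.find l [p])).filter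
        (fun j => decide (0 ≤ j)) with hhits
    have hkmem : (k : Int) ∈ hits := by
      have hfind : PySem.Chars.find l [c] = (k : Int) := by
        apply find_singleton_eq (List.getElem?_eq_getElem hk)
        intro j hj he
        have hjl : j < l.length := by omega
        rw [List.getElem?_eq_getElem hjl] at he
        exact hminP j hj (by rw [Option.some_inj.mp he]; exact hcp)
      rw [hhits]
      apply List.mem_filter.mpr
      exact ⟨List.mem_map.mpr ⟨c, hcp, hfind⟩, by simp⟩
    have hlb : ∀ h ∈ hits, (k : Int) ≤ h := by
      intro h hh
      obtain ⟨hmap, hpos⟩ := List.mem_filter.mp hh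
      obtain ⟨p, hp, rfl⟩ := List.mem_map.mp hmap
      have h0 : 0 ≤ PySem.Chars.find l [p] := by simpa using hpos
      obtain ⟨hpre, _⟩ := PySem.Chars.find_spec (s := l) (sub := [p]) h0
      have hget : l[(PySem.Chars.find l [p]).toNat]? = some p := singleton_prefix_drop_iff.mp hpre
      by_contra hlt
      push Not at hlt
      have hn : (PySem.Chars.find l [p]).toNat < k := by omega
      have hnl : (PySem.Chars.find l [p]).toNat < l.length := by omega
      rw [List.getElem?_eq_getElem hnl] at hget
      exact hminP _ hn (by rw [Option.some_inj.mp hget]; exact hp)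
    obtain ⟨m, hm⟩ : ∃ m, PySem.List.min? hits (fun x => x) = some m := by
      cases h : PySem.List.min? hits (fun x => x) with
      | none =>
        have he : hits = [] := by rwa [PySem.List.min?_eq_none_iff] at h
        rw [he] at hkmem; simp at hkmem
      | some m => exact ⟨m, rfl⟩
    have hmk : m = (k : Int) :=
      le_antisymm (PySem.List.min?_isMin hm _ hkmem) (hlb m (PySem.List.min?_mem hm))
    have halt : words_and_punctuation_alt word =
        [String.ofList (PySem.List.slice l none (some (k : Int))),
         String.ofList (PySem.List.pyGet? l (k : Int)).toList] := by
      unfold words_and_punctuation_alt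
      show (match PySem.List.min? hits (fun x => x) with
        | none => [word]
        | some i => [String.ofList (PySem.List.slice l none (some i)),
                     String.ofList (PySem.List.pyGet? l i).toList]) = _
      rw [hm, hmk]
    rw [halt]
    simp [PySem.List.slice_to_natCast]
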